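-- pv_equiv track=rewrite | github.com/hoddukz/myflightassistant | backend/app/services/flight_tracker.py | _n_to_icao24
-- ===== SOURCE A (Python) =====
-- from typing import Any, Optional
--
-- _ICAO_BASE = 0xA00001
--
-- _LETTERS = "ABCDEFGHJKLMNPQRSTUVWXYZ"  # 24자, I와 O 제외
--
-- _BUCKET = {1: 101711, 2: 10111, 3: 951, 4: 35, 5: 1}
--
-- _SUFFIX = {1: 601, 2: 601, 3: 601, 4: 25, 5: 1}
--
-- def _n_to_icao24(tail: str) -> Optional[str]:
--     """US N-number를 ICAO24 hex 코드로 변환한다."""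
--     tail = tail.upper().strip()
--     if not tail.startswith("N"):
--         return None
--
--     rest = tail[1:]
--     if not rest:
--         return None
--
--     # 숫자/문자 분리
--     digits: list[int] = []
--     letters: list[str] = []
--     for ch in rest:
--         if ch.isdigit() and not letters:
--             digits.append(int(ch))
--         elif ch in _LETTERS:
--             letters.append(ch)
--         else:
--             return None
--
--     if not digits or digits[0] == 0:
--         return None
--     if len(digits) > 5 or len(letters) > 2:
--         return None
--     if len(digits) + len(letters) > 5:
--         return None
--
--     offset = 0
--
--     # 첫 번째 숫자 (1-9)
--     offset += (digits[0] - 1) * _BUCKET[1]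
--
--     # 후속 숫자 (0-9)
--     for i in range(1, len(digits)):
--         offset += _SUFFIX[i] + digits[i] * _BUCKET[i + 1]
--
--     # 문자 접미사
--     if len(letters) == 1:
--         offset += 1 + _LETTERS.index(letters[0])
--     elif len(letters) == 2:
--         offset += 1 + 24 + _LETTERS.index(letters[0]) * 24 + _LETTERS.index(letters[1])
--
--     icao = _ICAO_BASE + offset
--     return format(icao, "06x")
-- ===== SOURCE B (Python) =====
-- # B: single-pass ranking walk over the N-number enumeration tree: one uniform
-- # loop over the tail with state (digits used, letters used), offsets derived
-- # from subtree sizes computed by a recurrence, instead of A's classification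
-- # loop plus three separate offset phases with hardcoded _BUCKET/_SUFFIX tables.
-- from typing import Optional
--
-- _LETTERS = "ABCDEFGHJKLMNPQRSTUVWXYZ"
--
--
-- def _nsuf(k: int) -> int:
--     # number of non-empty letter suffixes of length <= k
--     return 0 if k == 0 else 24 * (1 + _nsuf(k - 1))
--
--
-- def _subtree(d: int) -> int:
--     # number of valid tails having a given d-digit prefix (itself + extensions)
--     return 1 if d == 5 else 1 + _nsuf(min(2, 5 - d)) + 10 * _subtree(d + 1)
--
--
-- def _n_to_icao24(tail: str) -> Optional[str]:
--     tail = tail.upper().strip()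
--     if not tail.startswith("N"):
--         return None
--     rest = tail[1:]
--     if not rest or rest[0] not in "123456789":
--         return None
--     offset = "123456789".index(rest[0]) * _subtree(1)
--     rank = 0
--     d, l = 1, 0
--     for ch in rest[1:]:
--         if l == 0 and d < 5 and ch.isdigit():
--             offset += 1 + _nsuf(min(2, 5 - d)) + int(ch) * _subtree(d + 1)
--             d += 1
--         elif ch in _LETTERS and l < 2 and d + l < 5:
--             rank = rank * 24 + 1 + _LETTERS.index(ch)
--             l += 1
--         else:
--             return None
--     return format(0xA00001 + offset + rank, "06x")
-- ===== Notes on version B (the rewrite author's own statement) =====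
-- stated objective: alternative
-- what changed: B treats the N-number as a path in the registration enumeration tree and computes the ICAO offset by a single-pass ranking walk with one state machine (digits used, letters used), deriving each skipped-subtree size from the recurrence _subtree(d)=1+_nsuf(min(2,5-d))+10*_subtree(d+1), instead of A's separate digit/letter classification loop followed by three offset phases driven by the hardcoded _BUCKET/_SUFFIX tables; the letter suffix is folded as a biased base-24 rank inside the same loop.
import Mathlib
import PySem

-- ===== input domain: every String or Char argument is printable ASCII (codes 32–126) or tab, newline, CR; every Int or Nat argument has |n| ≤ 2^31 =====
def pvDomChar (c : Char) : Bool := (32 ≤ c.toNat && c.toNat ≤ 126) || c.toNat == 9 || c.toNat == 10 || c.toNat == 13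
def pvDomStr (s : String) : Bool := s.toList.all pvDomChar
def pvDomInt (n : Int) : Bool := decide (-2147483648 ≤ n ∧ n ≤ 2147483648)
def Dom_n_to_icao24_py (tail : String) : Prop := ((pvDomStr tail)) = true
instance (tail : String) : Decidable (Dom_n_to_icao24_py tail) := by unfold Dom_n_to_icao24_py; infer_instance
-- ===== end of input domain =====

-- B replaces A's classification loop plus three table-driven offset phases by a
-- single-pass ranking walk over the enumeration tree with recursively computed
-- subtree sizes (objective: alternative decomposition; same cost).

-- ===== PORT A =====
-- helpers shared by both ports (the same Python builtins appear in Source A and Source B):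
-- int(ch) for a single ASCII digit char ch (every call site is guarded by ch.isdigit(), where this is exact)
def pvDigitVal (c : Char) : Int := (c.toNat : Int) - 48

-- _LETTERS
def pvLetters : List Char := "ABCDEFGHJKLMNPQRSTUVWXYZ".toList

-- _LETTERS.index(c): every call site is guarded by c ∈ _LETTERS, so .index never raises ValueError
def pvLetterIdx (c : Char) : Int := (((PySem.List.index? pvLetters c).getD 0 : Nat) : Int)

-- format(icao, "06x") for icao ≥ 0 (exact there; every call site passes icao ≥ 0xA00001)
def pvHexDigitChar (n : Nat) : Char := if n < 10 then Char.ofNat (48 + n) else Char.ofNat (87 + n)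

def pvHexChars (n : Nat) : List Char :=
  if n < 16 then [pvHexDigitChar n]
  else pvHexChars (n / 16) ++ [pvHexDigitChar (n % 16)]
  decreasing_by exact Nat.div_lt_self (by omega) (by omega)

def pvFormat06x (n : Int) : String :=
  String.ofList (List.replicate (6 - (pvHexChars n.toNat).length) '0' ++ pvHexChars n.toNat)

-- _BUCKET and _SUFFIX (dict literals, insertion order)
def pvBucket : PySem.Dict Int Int :=
  ((((PySem.Dict.empty.insert 1 101711).insert 2 10111).insert 3 951).insert 4 35).insert 5 1
def pvSuffix : PySem.Dict Int Int :=
  ((((PySem.Dict.empty.insert 1 601).insert 2 601).insert 3 601).insert 4 25).insert 5 1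

-- _BUCKET[k] / _SUFFIX[k]: the keys are present at every call site (KeyError unreachable)
def pvBucketAt (k : Int) : Int := (pvBucket.get? k).getD 0
def pvSuffixAt (k : Int) : Int := (pvSuffix.get? k).getD 0

-- A's digit/letter separation loop over rest; none = the early `return None`
def pvSepA : List Char → List Int → List Char → Option (List Int × List Char)
  | [], ds, ls => some (ds, ls)
  | c :: t, ds, ls =>
    if PySem.Chars.isdigit c && decide (ls = []) then pvSepA t (ds ++ [pvDigitVal c]) ls
    else if pvLetters.contains c then pvSepA t ds (ls ++ [c])
    else none

-- A's body after `rest = tail[1:]` (cs = rest as chars)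
def pvCoreA (cs : List Char) : Option String :=
  if cs = [] then none else
  match pvSepA cs [] [] with
  | none => none
  | some (ds, ls) =>
    if decide (ds = []) || (PySem.List.pyGetD ds 0 0 == 0) then none
    else if decide (ds.length > 5) || decide (ls.length > 2) then none
    else if decide (ds.length + ls.length > 5) then none
    else
      let off1 : Int := 0 + (PySem.List.pyGetD ds 0 0 - 1) * pvBucketAt 1
      let off2 : Int := (PySem.List.pyRange 1 (ds.length : Int) 1).foldl
        (fun o i => o + (pvSuffixAt i + PySem.List.pyGetD ds i 0 * pvBucketAt (i + 1))) off1
      let off3 : Int :=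
        if ls.length = 1 then off2 + (1 + pvLetterIdx (PySem.List.pyGetD ls 0 ' '))
        else if ls.length = 2 then
          off2 + (1 + 24 + pvLetterIdx (PySem.List.pyGetD ls 0 ' ') * 24 + pvLetterIdx (PySem.List.pyGetD ls 1 ' '))
        else off2
      some (pvFormat06x (10485761 + off3))

def n_to_icao24_py (tail : String) : Option String :=
  let t := PySem.Str.strip (PySem.Str.upper tail)
  if !PySem.Str.startswith t "N" then none
  else pvCoreA (PySem.Chars.slice t.toList (some 1) none)

-- ===== PORT B =====
-- Source B's _nsuf(k): number of non-empty letter suffixes of length ≤ k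
def pvNsuf : Nat → Int
  | 0 => 0
  | k + 1 => 24 * (1 + pvNsuf k)

-- Source B's _subtree(d) = 1 if d == 5 else 1 + _nsuf(min(2,5-d)) + 10*_subtree(d+1),
-- written as structural recursion on j = 5 - d (the quantity the recursion descends on)
def pvSubtreeDown : Nat → Int
  | 0 => 1
  | j + 1 => 1 + pvNsuf (min 2 (j + 1)) + 10 * pvSubtreeDown j

def pvSubtree (d : Nat) : Int := pvSubtreeDown (5 - d)

-- "123456789"
def pvNineChars : List Char := "123456789".toList

-- Source B's single for-loop: state (d, l), accumulators (offset, rank); none = `return None`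
def pvWalkB : List Char → Nat → Nat → Int → Int → Option (Int × Int)
  | [], _, _, off, rank => some (off, rank)
  | c :: t, d, l, off, rank =>
    if l == 0 && decide (d < 5) && PySem.Chars.isdigit c then
      pvWalkB t (d + 1) l (off + (1 + pvNsuf (min 2 (5 - d)) + pvDigitVal c * pvSubtree (d + 1))) rank
    else if pvLetters.contains c && decide (l < 2) && decide (d + l < 5) then
      pvWalkB t d (l + 1) off (rank * 24 + 1 + pvLetterIdx c)
    else none

-- Source B's body after `rest = tail[1:]`
def pvCoreB : List Char → Option String
  | [] => none
  | c0 :: cs =>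
    if !pvNineChars.contains c0 then none
    else
      match pvWalkB cs 1 0 ((((PySem.List.index? pvNineChars c0).getD 0 : Nat) : Int) * pvSubtree 1) 0 with
      | none => none
      | some (off, rank) => some (pvFormat06x (10485761 + off + rank))

def n_to_icao24_py_alt (tail : String) : Option String :=
  let t := PySem.Str.strip (PySem.Str.upper tail)
  if !PySem.Str.startswith t "N" then none
  else pvCoreB (PySem.Chars.slice t.toList (some 1) none)

-- ===== PRECONDITION & SPEC =====
def Spec_n_to_icao24_py (tail : String) (out : Option String) : Prop := out = n_to_icao24_py_alt tail
instance (tail : String) (out : Option String) : Decidable (Spec_n_to_icao24_py tail out) := by unfold Spec_n_to_icao24_py; infer_instance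

-- ===== CLAIM (what is proved, stated in full; the proofs are below) =====
def Claim_equal_n_to_icao24_py : Prop := ∀ (tail : String), Dom_n_to_icao24_py tail → Spec_n_to_icao24_py tail (n_to_icao24_py tail)

-- ===== LEMMAS AND PROOFS =====
theorem pvSepA_letters (cs : List Char) (ds : List Int) (l : Char) (ls : List Char) :
    pvSepA cs ds (l :: ls) =
      if cs.all (pvLetters.contains ·) then some (ds, (l :: ls) ++ cs) else none := by
  induction cs generalizing ls with
  | nil => simp [pvSepA]
  | cons c t ih =>
    simp only [pvSepA, decide_eq_true_eq, Bool.and_eq_true, List.all_cons]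
    by_cases hc : c ∈ pvLetters
    · have h2 : (l :: ls) ++ [c] = l :: (ls ++ [c]) := by simp
      simp only [h2] at *
      simp [hc, ih (ls ++ [c])]
    · simp [hc]

theorem pvSepA_split (cs : List Char) (ds : List Int) :
    pvSepA cs ds [] =
      if (cs.dropWhile PySem.Chars.isdigit).all (pvLetters.contains ·)
      then some (ds ++ (cs.takeWhile PySem.Chars.isdigit).map pvDigitVal,
                 cs.dropWhile PySem.Chars.isdigit)
      else none := by
  induction cs generalizing ds with
  | nil => simp [pvSepA]
  | cons c t ih =>
    by_cases hd : PySem.Chars.isdigit c = true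
    · simp [pvSepA, hd, ih (ds ++ [pvDigitVal c])]
    · by_cases hc : c ∈ pvLetters
      · simp [pvSepA, hd, hc, pvSepA_letters]
      · simp [pvSepA, hd, hc]

-- the contribution of the digits consumed from state d, as pvWalkB accumulates it
def pvDigSum : Nat → List Char → Int
  | _, [] => 0
  | d, c :: t => 1 + pvNsuf (min 2 (5 - d)) + pvDigitVal c * pvSubtree (d + 1) + pvDigSum (d + 1) t

theorem pvDigit_not_letter (c : Char) (h : PySem.Chars.isdigit c = true) :
    pvLetters.contains c = false := by
  rw [List.contains_eq_mem, decide_eq_false_iff_not]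
  intro hm
  have hall : pvLetters.all (fun x => !PySem.Chars.isdigit x) = true := by decide
  have := List.all_eq_true.mp hall c hm
  simp [h] at this

theorem pvWalkB_letters (ls : List Char) (d l : Nat) (off rank : Int)
    (hl : 1 ≤ l) (hl2 : l ≤ 2) (hdl : d + l ≤ 5) :
    pvWalkB ls d l off rank =
      if (ls.all (pvLetters.contains ·)) = true ∧ l + ls.length ≤ 2 ∧ d + l + ls.length ≤ 5
      then some (off, ls.foldl (fun r c => r * 24 + 1 + pvLetterIdx c) rank)
      else none := by
  induction ls generalizing l rank with
  | nil =>
    simp only [pvWalkB, List.all_nil, List.length_nil, List.foldl_nil]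
    rw [if_pos ⟨by simp, by omega, by omega⟩]
  | cons c t ih =>
    have hl0 : (l == 0) = false := by simp; omega
    by_cases hc : pvLetters.contains c = true
    · by_cases h2 : l < 2 ∧ d + l < 5
      · simp only [pvWalkB, hl0, Bool.false_and, Bool.false_eq_true, if_false, hc,
          decide_eq_true h2.1, decide_eq_true h2.2, Bool.true_and, Bool.and_self, if_true]
        rw [ih (l + 1) _ (by omega) (by omega) (by omega)]
        simp only [List.all_cons, hc, Bool.true_and, List.length_cons, List.foldl_cons]
        exact if_congr
          (by constructor <;> rintro ⟨h1, h2', h3'⟩ <;> exact ⟨h1, by omega, by omega⟩) rfl rfl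
      · simp only [pvWalkB, hl0, Bool.false_and, Bool.false_eq_true, if_false, hc, Bool.true_and]
        have hfe : (decide (l < 2) && decide (d + l < 5)) = false := by
          rcases (by omega : ¬ (l < 2) ∨ ¬ (d + l < 5)) with h | h <;> simp [h]
        rw [hfe]
        simp only [Bool.false_eq_true, if_false]
        rw [if_neg]; rintro ⟨-, h2', h3'⟩; simp only [List.length_cons] at h2' h3'; omega
    · simp only [pvWalkB, hl0, Bool.false_and, Bool.false_eq_true, if_false, hc, Bool.false_and,
        if_false]
      rw [if_neg]; rintro ⟨hall, -⟩
      rw [List.all_cons, Bool.and_eq_true] at hall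
      exact hc hall.1

theorem pvWalkB_main (cs : List Char) (d : Nat) (off : Int) (hd : 1 ≤ d) (hd5 : d ≤ 5) :
    pvWalkB cs d 0 off 0 =
      if ((cs.dropWhile PySem.Chars.isdigit).all (pvLetters.contains ·)) = true
         ∧ (cs.dropWhile PySem.Chars.isdigit).length ≤ 2
         ∧ d + (cs.takeWhile PySem.Chars.isdigit).length + (cs.dropWhile PySem.Chars.isdigit).length ≤ 5
      then some (off + pvDigSum d (cs.takeWhile PySem.Chars.isdigit),
                 (cs.dropWhile PySem.Chars.isdigit).foldl (fun r c => r * 24 + 1 + pvLetterIdx c) 0)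
      else none := by
  induction cs generalizing d off with
  | nil =>
    simp only [pvWalkB, List.dropWhile_nil, List.takeWhile_nil, List.all_nil, List.length_nil,
      List.foldl_nil, pvDigSum]
    rw [if_pos ⟨by simp, by omega, by omega⟩]
    simp
  | cons c t ih =>
    by_cases hdg : PySem.Chars.isdigit c = true
    · simp only [List.takeWhile_cons, List.dropWhile_cons, hdg, if_true]
      by_cases h5 : d < 5
      · simp only [pvWalkB, hdg, decide_eq_true h5, Bool.and_true, beq_self_eq_true,
          Bool.true_and, if_true]
        rw [ih (d + 1) _ (by omega) (by omega)]
        simp only [List.length_cons, pvDigSum]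
        exact if_congr
          (by constructor <;> rintro ⟨h1, h2', h3'⟩ <;> exact ⟨h1, h2', by omega⟩)
          (by rw [add_assoc]) rfl
      · simp only [pvWalkB, hdg, decide_eq_false h5, Bool.and_false, Bool.false_and,
          Bool.and_true, Bool.false_eq_true, if_false, pvDigit_not_letter c hdg, Bool.false_and,
          if_false]
        rw [if_neg]; rintro ⟨-, -, h⟩; simp only [List.length_cons] at h; omega
    · simp only [List.takeWhile_cons, List.dropWhile_cons, hdg, if_false, Bool.false_eq_true]
      by_cases hc : pvLetters.contains c = true
      · by_cases h5 : d < 5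
        · simp only [pvWalkB, hdg, Bool.and_false, Bool.false_eq_true, if_false, hc,
            decide_eq_true h5, decide_eq_true (by omega : (0:Nat) < 2), Nat.add_zero,
            Bool.true_and, Bool.and_self, if_true]
          rw [pvWalkB_letters t d 1 off _ (by omega) (by omega) (by omega)]
          simp only [List.all_cons, hc, Bool.true_and, List.length_cons, List.takeWhile_nil,
            List.length_nil, List.foldl_cons, pvDigSum]
          exact if_congr
            (by constructor <;> rintro ⟨h1, h2', h3'⟩ <;> exact ⟨h1, by omega, by omega⟩)
            (by simp) rfl
        · simp only [pvWalkB, hdg, Bool.and_false, Bool.false_eq_true, if_false, hc,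
            Nat.add_zero, decide_eq_false h5, Bool.and_false, Bool.true_and, Bool.false_eq_true,
            if_false]
          rw [if_neg]
          rintro ⟨-, -, h⟩
          simp only [List.takeWhile_nil, List.length_nil, List.length_cons] at h; omega
      · simp only [pvWalkB, hdg, Bool.and_false, Bool.false_eq_true, if_false, hc,
          Bool.false_and, if_false]
        rw [if_neg]; rintro ⟨hall, -⟩
        rw [List.all_cons, Bool.and_eq_true] at hall
        exact hc hall.1

theorem pvNine_facts (c : Char) (h : c ∈ pvNineChars) :
    PySem.Chars.isdigit c = true ∧
    (((PySem.List.index? pvNineChars c).getD 0 : Nat) : Int) = pvDigitVal c - 1 ∧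
    (pvDigitVal c == 0) = false ∧ 1 ≤ pvDigitVal c ∧ pvDigitVal c ≤ 9 := by
  have hall : pvNineChars.all (fun c => PySem.Chars.isdigit c &&
      ((((PySem.List.index? pvNineChars c).getD 0 : Nat) : Int) == pvDigitVal c - 1) &&
      !(pvDigitVal c == 0) && decide (1 ≤ pvDigitVal c) && decide (pvDigitVal c ≤ 9)) = true := by
    decide
  have hc := List.all_eq_true.mp hall c h
  simp only [Bool.and_eq_true, beq_iff_eq, Bool.not_eq_true', decide_eq_true_eq] at hc
  exact ⟨hc.1.1.1.1, hc.1.1.1.2, hc.1.1.2, hc.1.2, hc.2⟩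

theorem pvZeroChar (c : Char) (h1 : PySem.Chars.isdigit c = true)
    (h2 : pvNineChars.contains c = false) : (pvDigitVal c == 0) = true := by
  have hb : 48 ≤ c.toNat ∧ c.toNat ≤ 57 := by
    by_contra hcon
    rw [show PySem.Chars.isdigit c = (decide (48 ≤ c.toNat) && decide (c.toNat ≤ 57)) from rfl] at h1
    simp at h1; omega
  have h48 : c.toNat = 48 := by
    by_contra hne
    have : c ∈ pvNineChars := by
      have hh : c.toNat = 49 ∨ c.toNat = 50 ∨ c.toNat = 51 ∨ c.toNat = 52 ∨ c.toNat = 53 ∨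
          c.toNat = 54 ∨ c.toNat = 55 ∨ c.toNat = 56 ∨ c.toNat = 57 := by omega
      have hofn := Char.ofNat_toNat c
      rcases hh with h | h | h | h | h | h | h | h | h <;>
        (rw [← hofn, h]; decide)
    rw [List.contains_eq_mem, decide_eq_true this] at h2; exact absurd h2 (by simp)
  simp [pvDigitVal, h48]

theorem pvR1 : PySem.List.pyRange 1 1 1 = [] := by decide
theorem pvR2 : PySem.List.pyRange 1 2 1 = [1] := by decide
theorem pvR3 : PySem.List.pyRange 1 3 1 = [1, 2] := by decide
theorem pvR4 : PySem.List.pyRange 1 4 1 = [1, 2, 3] := by decide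
theorem pvR5 : PySem.List.pyRange 1 5 1 = [1, 2, 3, 4] := by decide
theorem pvBucketAt_1 : pvBucketAt 1 = 101711 := by decide
theorem pvBucketAt_2 : pvBucketAt 2 = 10111 := by decide
theorem pvBucketAt_3 : pvBucketAt 3 = 951 := by decide
theorem pvBucketAt_4 : pvBucketAt 4 = 35 := by decide
theorem pvBucketAt_5 : pvBucketAt 5 = 1 := by decide
theorem pvSuffixAt_1 : pvSuffixAt 1 = 601 := by decide
theorem pvSuffixAt_2 : pvSuffixAt 2 = 601 := by decide
theorem pvSuffixAt_3 : pvSuffixAt 3 = 601 := by decide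
theorem pvSuffixAt_4 : pvSuffixAt 4 = 25 := by decide
theorem pvSubtree_1 : pvSubtree 1 = 101711 := by decide
theorem pvSubtree_2 : pvSubtree 2 = 10111 := by decide
theorem pvSubtree_3 : pvSubtree 3 = 951 := by decide
theorem pvSubtree_4 : pvSubtree 4 = 35 := by decide
theorem pvSubtree_5 : pvSubtree 5 = 1 := by decide
theorem pvNsufM1 : pvNsuf (min 2 (5 - 1)) = 600 := by decide
theorem pvNsufM2 : pvNsuf (min 2 (5 - 2)) = 600 := by decide
theorem pvNsufM3 : pvNsuf (min 2 (5 - 3)) = 600 := by decide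
theorem pvNsufM4 : pvNsuf (min 2 (5 - 4)) = 24 := by decide

theorem pvE01 : ((0:Nat) = 1) = False := by simp
theorem pvE02 : ((0:Nat) = 2) = False := by simp
theorem pvE11 : ((1:Nat) = 1) = True := by simp
theorem pvE12 : ((1:Nat) = 2) = False := by simp
theorem pvE21 : ((2:Nat) = 1) = False := by simp
theorem pvE22 : ((2:Nat) = 2) = True := by simp

theorem pvGet0 {α : Type} (a : α) (l : List α) (d : α) : PySem.List.pyGetD (a :: l) 0 d = a := by
  simp [PySem.List.pyGetD, PySem.List.pyGet?, PySem.List.pyIdx?]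
theorem pvGet1 {α : Type} (a b : α) (l : List α) (d : α) : PySem.List.pyGetD (a :: b :: l) 1 d = b := by
  simp [PySem.List.pyGetD, PySem.List.pyGet?, PySem.List.pyIdx?]
theorem pvGet2 {α : Type} (a b c : α) (l : List α) (d : α) : PySem.List.pyGetD (a :: b :: c :: l) 2 d = c := by
  have h : (2:Int) ≤ (l.length : Int) + 1 + 1 := by omega
  simp [PySem.List.pyGetD, PySem.List.pyGet?, PySem.List.pyIdx?, h]
theorem pvGet3 {α : Type} (a b c e : α) (l : List α) (d : α) : PySem.List.pyGetD (a :: b :: c :: e :: l) 3 d = e := by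
  have h : (3:Int) ≤ (l.length : Int) + 1 + 1 + 1 := by omega
  simp [PySem.List.pyGetD, PySem.List.pyGet?, PySem.List.pyIdx?, h]
theorem pvGet4 {α : Type} (a b c e f : α) (l : List α) (d : α) : PySem.List.pyGetD (a :: b :: c :: e :: f :: l) 4 d = f := by
  have h : (4:Int) ≤ (l.length : Int) + 1 + 1 + 1 + 1 := by omega
  simp [PySem.List.pyGetD, PySem.List.pyGet?, PySem.List.pyIdx?, h]

theorem pvCore_eq (cs : List Char) : pvCoreA cs = pvCoreB cs := by
  match cs with
  | [] => rfl
  | c0 :: cs0 =>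
    unfold pvCoreA pvCoreB
    rw [pvSepA_split]
    simp only [List.nil_append, reduceCtorEq, if_false]
    by_cases hc0 : pvNineChars.contains c0 = true
    · have hmem : c0 ∈ pvNineChars := by
        rw [List.contains_eq_mem, decide_eq_true_eq] at hc0; exact hc0
      obtain ⟨hdg, hidx, hnz, hlo, hhi⟩ := pvNine_facts c0 hmem
      simp only [hc0, Bool.not_true, Bool.false_eq_true, if_false, hidx,
        List.takeWhile_cons, List.dropWhile_cons, hdg, if_true]
      rw [pvWalkB_main cs0 1 _ (by omega) (by omega)]
      generalize cs0.takeWhile PySem.Chars.isdigit = tw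
      generalize cs0.dropWhile PySem.Chars.isdigit = dw
      by_cases hall : (dw.all fun c => pvLetters.contains c) = true
      · rw [if_pos hall]
        simp only [List.map_cons, pvGet0, hnz, reduceCtorEq, decide_false, Bool.or_false,
          Bool.false_eq_true, if_false, List.length_cons, List.length_map]
        by_cases hn5 : tw.length + 1 > 5
        · rw [if_pos (by simp [hn5]), if_neg]; rintro ⟨-, -, h⟩; omega
        · by_cases hm2 : dw.length > 2
          · rw [if_pos (by simp [hm2]), if_neg]; rintro ⟨-, h, -⟩; omega
          · by_cases hs5 : tw.length + 1 + dw.length > 5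
            · rw [if_neg (by simp; omega), if_pos (by simp [hs5]), if_neg]
              rintro ⟨-, -, h⟩; omega
            · have hpos : ((dw.all fun c => pvLetters.contains c) = true) ∧
                  dw.length ≤ 2 ∧ 1 + tw.length + dw.length ≤ 5 := ⟨hall, by omega, by omega⟩
              rw [if_neg (by simp; omega), if_neg (by simp; omega), if_pos hpos]
              rcases dw with _ | ⟨l0, _ | ⟨l1, _ | ⟨lx, dwr⟩⟩⟩ <;>
              rcases tw with _ | ⟨d1, _ | ⟨d2, _ | ⟨d3, _ | ⟨d4, _ | ⟨dx, twr⟩⟩⟩⟩⟩ <;>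
                first
                | (exfalso
                   simp only [List.length_cons, List.length_nil] at hn5 hm2 hs5
                   omega)
                | (simp only [List.map_cons, List.map_nil, List.length_cons, List.length_nil,
                    Nat.reduceAdd, Nat.cast_ofNat, Nat.cast_one, Int.reduceAdd,
                    pvR1, pvR2, pvR3, pvR4, pvR5, List.foldl_cons, List.foldl_nil,
                    pvGet0, pvGet1, pvGet2, pvGet3, pvGet4, pvDigSum,
                    pvBucketAt_1, pvBucketAt_2, pvBucketAt_3, pvBucketAt_4, pvBucketAt_5,
                    pvSuffixAt_1, pvSuffixAt_2, pvSuffixAt_3, pvSuffixAt_4,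
                    pvSubtree_1, pvSubtree_2, pvSubtree_3, pvSubtree_4, pvSubtree_5,
                    pvNsufM1, pvNsufM2, pvNsufM3, pvNsufM4,
                    pvE01, pvE02, pvE11, pvE12, pvE21, pvE22, if_true, if_false,
                    reduceIte, Option.some.injEq]
                   exact congrArg pvFormat06x (by ring))
      · rw [if_neg hall, if_neg (fun h => hall h.1)]
    · have hc0' : pvNineChars.contains c0 = false := by simp at hc0; simp [hc0]
      simp only [hc0', Bool.not_false, if_true]
      by_cases hdg : PySem.Chars.isdigit c0 = true
      · have hz := pvZeroChar c0 hdg hc0'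
        simp only [List.takeWhile_cons, List.dropWhile_cons, hdg, if_true, List.map_cons]
        by_cases hall2 : ((cs0.dropWhile PySem.Chars.isdigit).all fun c => pvLetters.contains c) = true
        · rw [if_pos hall2]
          simp [pvGet0, hz]
        · rw [if_neg hall2]
      · simp only [List.takeWhile_cons, List.dropWhile_cons, hdg, Bool.false_eq_true, if_false,
          List.map_nil]
        by_cases hall2 : (((c0 :: cs0).all fun c => pvLetters.contains c) = true)
        · rw [if_pos hall2]
          simp
        · rw [if_neg hall2]

-- ===== VERDICT (by name: the statement is the Claim_ definition above) =====
theorem n_to_icao24_py_spec : Claim_equal_n_to_icao24_py := by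
  intro tail _
  show n_to_icao24_py tail = n_to_icao24_py_alt tail
  unfold n_to_icao24_py n_to_icao24_py_alt
  simp only [pvCore_eq]
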